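-- pv_equiv track=rewrite | github.com/ragama123/myapps | badminton_teams.py | generate_fixtures
-- ===== SOURCE A (Python) =====
-- def generate_fixtures(teams):
--     fixtures = []
--     num_teams = len(teams)
--
--     # Each team should play against every other team in a round-robin format
--     for i in range(num_teams):
--         for j in range(i + 1, num_teams):
--             if teams[i] and teams[j]:  # Ensure no empty strings are included
--                 fixtures.append({"Team 1": teams[i], "Team 2": teams[j]})
--
--     return fixtures
-- ===== SOURCE B (Python) =====
-- def generate_fixtures(teams):
--     # Two-phase: filter out empty names once, then pair each head with its tail.
--     valid = [t for t in teams if t]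
--     fixtures = []
--     rest = valid
--     while rest:
--         a, rest = rest[0], rest[1:]
--         fixtures.extend({"Team 1": a, "Team 2": b} for b in rest)
--     return fixtures
-- ===== Notes on version B (the rewrite author's own statement) =====
-- stated objective: simpler
-- what changed: A's triangular index scan with an inline truthiness guard on every pair is replaced by one pass that filters out empty names first and then pairs each head with its tail, so the pairing loop carries no guard and touches no indices.
import Mathlib
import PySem

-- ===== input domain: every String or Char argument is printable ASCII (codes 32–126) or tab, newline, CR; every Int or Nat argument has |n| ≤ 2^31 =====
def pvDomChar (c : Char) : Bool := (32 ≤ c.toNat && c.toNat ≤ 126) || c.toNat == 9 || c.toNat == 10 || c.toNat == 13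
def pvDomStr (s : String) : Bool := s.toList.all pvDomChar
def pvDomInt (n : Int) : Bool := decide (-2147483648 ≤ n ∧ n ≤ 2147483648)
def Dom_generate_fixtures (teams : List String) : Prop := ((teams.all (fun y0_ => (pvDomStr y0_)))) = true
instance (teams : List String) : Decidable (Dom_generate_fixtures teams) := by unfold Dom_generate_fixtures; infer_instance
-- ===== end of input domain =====

-- B replaces A's triangular index scan with an inline truthiness guard by a one-pass
-- filter of the non-empty teams followed by head/tail pairing (objective: simpler).

-- ===== PORT A =====
def generate_fixtures (teams : List String) : List (List (String × String)) :=
  let fixtures : List (List (String × String)) := []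
  let num_teams : Int := teams.length
  (PySem.List.pyRange 0 num_teams 1).foldl (fun fx i =>
    (PySem.List.pyRange (i + 1) num_teams 1).foldl (fun fx j =>
      if (PySem.List.pyGetD teams i "" != "") && (PySem.List.pyGetD teams j "" != "") then
        fx ++ [[("Team 1", PySem.List.pyGetD teams i ""), ("Team 2", PySem.List.pyGetD teams j "")]]
      else fx) fx) fixtures

-- ===== PORT B =====
-- the while loop of Source B: take the head, pair it with everything after it, recurse on the tail
def pairHeadTail : List String → List (List (String × String))
  | [] => []
  | a :: rest => rest.map (fun b => [("Team 1", a), ("Team 2", b)]) ++ pairHeadTail rest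

def generate_fixtures_alt (teams : List String) : List (List (String × String)) :=
  pairHeadTail (teams.filter (fun t => t != ""))

-- ===== PRECONDITION & SPEC =====
def Spec_generate_fixtures (teams : List String) (out : List (List (String × String))) : Prop := out = generate_fixtures_alt teams
instance (teams : List String) (out : List (List (String × String))) : Decidable (Spec_generate_fixtures teams out) := by unfold Spec_generate_fixtures; infer_instance

-- ===== CLAIM (what is proved, stated in full; the proofs are below) =====
def Claim_equal_generate_fixtures : Prop := ∀ (teams : List String), Dom_generate_fixtures teams → Spec_generate_fixtures teams (generate_fixtures teams)

-- ===== LEMMAS AND PROOFS =====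

def pvBlockN (xs : List String) (k : Nat) : List (List (String × String)) :=
  ((List.range (xs.length - (k+1))).filter
      (fun d => (xs.getD k "" != "") && (xs.getD (d+k+1) "" != ""))).map
    (fun d => [("Team 1", xs.getD k ""), ("Team 2", xs.getD (d+k+1) "")])

lemma map_getD_range (xs : List String) (d : String) :
    (List.range xs.length).map (fun j => xs.getD j d) = xs := by
  apply List.ext_getElem
  · simp
  · intro i h1 h2
    simp [List.getD_eq_getElem?_getD, List.getElem?_eq_getElem h2]

lemma range_filter_map (xs : List String) (e : String) (p : String → Bool)
    (f : String → List (String × String)) :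
    ((List.range xs.length).filter (fun d => p (xs.getD d e))).map (fun d => f (xs.getD d e))
      = (xs.filter p).map f := by
  have h := @List.filter_map ℕ String (fun j => xs.getD j e) p (List.range xs.length)
  simp only [Function.comp_def] at h
  calc ((List.range xs.length).filter (fun d => p (xs.getD d e))).map (fun d => f (xs.getD d e))
      = (((List.range xs.length).filter (fun d => p (xs.getD d e))).map (fun j => xs.getD j e)).map f := by
        simp [List.map_map]
    _ = ((List.range xs.length).map (fun j => xs.getD j e) |>.filter p).map f := by rw [← h]
    _ = (xs.filter p).map f := by rw [map_getD_range]

theorem gf_flat (teams : List String) :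
    generate_fixtures teams =
      (PySem.List.pyRange 0 (teams.length : Int) 1).flatMap (fun i =>
        ((PySem.List.pyRange (i+1) (teams.length : Int) 1).filter
            (fun j => (PySem.List.pyGetD teams i "" != "") && (PySem.List.pyGetD teams j "" != ""))).map
          (fun j => [("Team 1", PySem.List.pyGetD teams i ""), ("Team 2", PySem.List.pyGetD teams j "")])) := by
  simp only [generate_fixtures, PySem.List.foldl_append_if, PySem.List.foldl_append_eq_flatMap,
    List.nil_append]

theorem pyBlock_eq (teams : List String) (k : Nat) :
    ((PySem.List.pyRange ((k:Int)+1) (teams.length : Int) 1).filter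
        (fun j => (PySem.List.pyGetD teams (k:Int) "" != "") && (PySem.List.pyGetD teams j "" != ""))).map
      (fun j => [("Team 1", PySem.List.pyGetD teams (k:Int) ""), ("Team 2", PySem.List.pyGetD teams j "")])
    = pvBlockN teams k := by
  rw [PySem.List.pyRange_one]
  have hn : ((teams.length : Int) - ((k:Int)+1)).toNat = teams.length - (k+1) := by omega
  rw [hn, List.filter_map, List.map_map]
  unfold pvBlockN
  have hidx : ∀ d : Nat, ((k:Int) + 1 + (d:Int)) = ((d + k + 1 : Nat) : Int) := by
    intro d; push_cast; ring
  congr 1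
  · funext d
    simp only [Function.comp_def, hidx d, PySem.List.pyGetD_natCast]
  · apply List.filter_congr
    intro d _
    simp only [Function.comp_def, hidx d, PySem.List.pyGetD_natCast]

theorem gf_blocks (teams : List String) :
    generate_fixtures teams = (List.range teams.length).flatMap (pvBlockN teams) := by
  rw [gf_flat, PySem.List.pyRange_one]
  have : ((teams.length : Int) - 0).toNat = teams.length := by omega
  rw [this, List.flatMap_map]
  apply List.flatMap_congr
  · intro k _
    simp only [zero_add]
    exact pyBlock_eq teams k

lemma pvBlockN_succ (t : String) (rest : List String) (k : Nat) :
    pvBlockN (t :: rest) (k + 1) = pvBlockN rest k := by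
  unfold pvBlockN
  simp only [List.length_cons, Nat.succ_sub_succ, List.getD_cons_succ, ← Nat.add_assoc]

lemma pvBlockN_zero (t : String) (rest : List String) :
    pvBlockN (t :: rest) 0 =
      if t != "" then (rest.filter (fun s => s != "")).map (fun b => [("Team 1", t), ("Team 2", b)])
      else [] := by
  unfold pvBlockN
  simp only [List.length_cons, Nat.add_sub_cancel, List.getD_cons_zero, Nat.add_zero,
    List.getD_cons_succ]
  by_cases ht : (t != "") = true
  · simp only [ht, Bool.true_and]
    exact range_filter_map rest "" (fun s => s != "") (fun b => [("Team 1", t), ("Team 2", b)])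
  · simp at ht
    simp [ht]

theorem blocks_eq : ∀ (xs : List String),
    (List.range xs.length).flatMap (pvBlockN xs) = pairHeadTail (xs.filter (fun t => t != ""))
  | [] => by simp [pairHeadTail]
  | t :: rest => by
    rw [List.length_cons, List.range_succ_eq_map, List.flatMap_cons, List.flatMap_map]
    have htail : (List.range rest.length).flatMap (fun a => pvBlockN (t :: rest) a.succ)
        = pairHeadTail (rest.filter (fun t => t != "")) := by
      rw [← blocks_eq rest]
      apply List.flatMap_congr
      intro k _
      exact pvBlockN_succ t rest k
    rw [htail, pvBlockN_zero, List.filter_cons]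
    by_cases ht : (t != "") = true
    · simp only [ht, if_true]
      rfl
    · simp only [ht]
      simp at ht
      simp

theorem generate_fixtures_eq (teams : List String) :
    generate_fixtures teams = generate_fixtures_alt teams := by
  rw [gf_blocks, blocks_eq]
  rfl

-- ===== VERDICT (by name: the statement is the Claim_ definition above) =====
theorem generate_fixtures_spec : Claim_equal_generate_fixtures := by
  intro teams _
  exact generate_fixtures_eq teams
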